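-- pv_equiv track=rewrite | github.com/jinghaox/algorithms | google_oa/compare_strings/compare_strings.py | compare_strings_mine
-- ===== SOURCE A (Python) =====
-- from typing import List
--
-- def compare_strings_mine(str1: List[str], str2: List[str]) -> List[int]:
--     # WRITE YOUR BRILLIANT CODE HERE
--     ret = []
--     str2_list = []
--     for s2 in str2:
--         all_chars = [x for x in s2]
--         smallest_char = min(all_chars)
--         s2_dict = {}
--         # s2_dict[smallest_char] = all_chars.count(smallest_char)
--         # str2_list.append(s2_dict)
--         s2_smallest_count = all_chars.count(smallest_char)
--         str2_list.append(s2_smallest_count)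
--
--     str1_list = []
--     for s1 in str1:
--         all_chars = [x for x in s1]
--         smallest_char = min(all_chars)
--         s1_dict = {}
--         # s1_dict[smallest_char] = all_chars.count(smallest_char)
--         # str1_list.append(s1_dict)
--         s1_smallest_count = all_chars.count(smallest_char)
--         str1_list.append(s1_smallest_count)
--
--
--     for y in str2_list:
--         cnt = 0
--         for x in str1_list:
--             # v1 = list(x.values())[0]
--             # v2 = list(y.values())[0]
--             # if v1<v2:
--             if x < y:
--                 cnt += 1
--         ret.append(cnt)
--
--     return ret
-- ===== SOURCE B (Python) =====
-- from typing import List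
--
-- def compare_strings_mine(str1: List[str], str2: List[str]) -> List[int]:
--     # Sort str1's smallest-char frequencies once, then binary-search per query.
--     counts = sorted(s.count(min(s)) for s in str1)
--     n = len(counts)
--     ret = []
--     for s in str2:
--         y = s.count(min(s))
--         lo, hi = 0, n
--         while lo < hi:
--             mid = (lo + hi) // 2
--             if counts[mid] < y:
--                 lo = mid + 1
--             else:
--                 hi = mid
--         ret.append(lo)
--     return ret
-- ===== Notes on version B (the rewrite author's own statement) =====
-- stated objective: faster
-- what changed: B sorts str1's smallest-char frequency list once and answers each str2 query with a hand-written bisect_left binary search, replacing A's inner linear scan over str1 per query.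
import Mathlib
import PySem

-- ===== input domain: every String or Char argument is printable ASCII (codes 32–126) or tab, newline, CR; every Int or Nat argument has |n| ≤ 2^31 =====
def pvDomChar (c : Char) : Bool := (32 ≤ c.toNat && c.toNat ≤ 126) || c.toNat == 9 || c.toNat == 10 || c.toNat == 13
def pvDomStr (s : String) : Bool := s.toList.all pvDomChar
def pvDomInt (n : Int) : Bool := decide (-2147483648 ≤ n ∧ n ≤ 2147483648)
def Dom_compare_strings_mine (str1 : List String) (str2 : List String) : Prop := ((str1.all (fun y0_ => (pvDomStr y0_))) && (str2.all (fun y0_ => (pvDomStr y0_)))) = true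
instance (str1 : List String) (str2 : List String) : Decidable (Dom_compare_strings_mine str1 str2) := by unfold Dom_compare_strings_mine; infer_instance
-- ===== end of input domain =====

-- B sorts str1's smallest-char frequencies once and answers each str2 query by binary search
-- instead of A's inner linear scan per query (objective: faster, asymptotic).

-- ===== PORT A =====
-- frequency of the smallest character of s: min(all_chars) raises ValueError on an empty
-- string (excluded by Pre_); the port returns 0 there (PySem.List.min? = none).
def compare_strings_mine (str1 : List String) (str2 : List String) : List Int :=
  let str2_list : List Int := str2.map (fun s2 =>
    let all_chars := s2.toList
    match PySem.List.min? all_chars (fun x => x) with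
    | some smallest_char => (PySem.List.count all_chars smallest_char : Int)
    | none => 0)
  let str1_list : List Int := str1.map (fun s1 =>
    let all_chars := s1.toList
    match PySem.List.min? all_chars (fun x => x) with
    | some smallest_char => (PySem.List.count all_chars smallest_char : Int)
    | none => 0)
  str2_list.map (fun y => str1_list.foldl (fun cnt x => if x < y then cnt + 1 else cnt) (0 : Int))

-- ===== PORT B =====
-- s.count(min(s)); as in A, the Python raises on an empty string (outside Pre_), port returns 0.
def pvFreqB (s : String) : Int :=
  match PySem.List.min? s.toList (fun x => x) with
  | some c => (PySem.List.count s.toList c : Int)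
  | none => 0

-- the hand-written bisect_left loop of Source B; counts[mid] is always in range (mid < hi ≤ len)
def pvBisect (counts : List Int) (y : Int) (lo hi : Nat) : Nat :=
  if h : lo < hi then
    let mid := (lo + hi) / 2
    if counts.getD mid 0 < y then pvBisect counts y (mid + 1) hi
    else pvBisect counts y lo mid
  else lo
termination_by hi - lo
decreasing_by all_goals omega

def compare_strings_mine_alt (str1 : List String) (str2 : List String) : List Int :=
  let counts := PySem.List.sorted (str1.map pvFreqB) (fun x => x) false
  let n := counts.length
  str2.map (fun s => (pvBisect counts (pvFreqB s) 0 n : Int))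

-- ===== PRECONDITION & SPEC =====
-- Pre_ excludes inputs containing an empty string: Python's min([]) raises ValueError
-- in A (and in B); nothing else is excluded.
def Pre_compare_strings_mine (str1 : List String) (str2 : List String) : Prop :=
  (∀ s ∈ str1, s.toList ≠ []) ∧ (∀ s ∈ str2, s.toList ≠ [])
instance (str1 : List String) (str2 : List String) : Decidable (Pre_compare_strings_mine str1 str2) := by unfold Pre_compare_strings_mine; infer_instance

def pvWitness_compare_strings_mine : List String × List String := (["abb", "zz"], ["ba", "c"])

def Spec_compare_strings_mine (str1 : List String) (str2 : List String) (out : List Int) : Prop := out = compare_strings_mine_alt str1 str2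
instance (str1 : List String) (str2 : List String) (out : List Int) : Decidable (Spec_compare_strings_mine str1 str2 out) := by unfold Spec_compare_strings_mine; infer_instance

-- ===== CLAIM (what is proved, stated in full; the proofs are below) =====
def Claim_equal_compare_strings_mine : Prop := ∀ (str1 : List String) (str2 : List String), Dom_compare_strings_mine str1 str2 → Pre_compare_strings_mine str1 str2 → Spec_compare_strings_mine str1 str2 (compare_strings_mine str1 str2)

-- ===== LEMMAS AND PROOFS =====

-- the binary-search loop on a sorted list computes the number of elements < y,
-- given the loop invariant (everything left of lo is < y, nothing from hi on is)
lemma pvBisect_eq_countP (a : List Int) (y : Int)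
    (hs : List.Pairwise (· ≤ ·) a) :
    ∀ lo hi, lo ≤ hi → hi ≤ a.length →
      (∀ i, i < lo → a.getD i 0 < y) →
      (∀ i, hi ≤ i → i < a.length → ¬ a.getD i 0 < y) →
      pvBisect a y lo hi = a.countP (fun x => decide (x < y)) := by
  intro lo hi
  induction lo, hi using pvBisect.induct a y with
  | case1 lo hi h mid hlt ih =>
    intro hlohi hhilen h1 h2
    rw [pvBisect]
    simp only [h, dite_true]
    rw [if_pos hlt]
    apply ih (by omega) hhilen
    · intro i hi'
      rcases Nat.lt_or_ge i mid with hc | hc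
      · -- a[i] ≤ a[mid] < y by sortedness
        have hmlen : mid < a.length := by omega
        have hilen : i < a.length := by omega
        have := (List.pairwise_iff_getElem.mp hs) i mid hilen hmlen hc
        have hm : a.getD mid 0 = a[mid] := List.getD_eq_getElem a 0 hmlen
        have hi2 : a.getD i 0 = a[i] := List.getD_eq_getElem a 0 hilen
        rw [hi2]; rw [hm] at hlt; omega
      · have : i = mid := by omega
        subst this; exact hlt
    · exact h2
  | case2 lo hi h mid hlt ih =>
    intro hlohi hhilen h1 h2
    rw [pvBisect]
    simp only [h, dite_true]
    rw [if_neg hlt]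
    apply ih (by omega) (by omega) h1
    intro i hmi hilen
    rcases Nat.lt_or_ge mid i with hc | hc
    · have hmlen : mid < a.length := by omega
      have := (List.pairwise_iff_getElem.mp hs) mid i hmlen hilen hc
      have hm : a.getD mid 0 = a[mid] := List.getD_eq_getElem a 0 hmlen
      have hi2 : a.getD i 0 = a[i] := List.getD_eq_getElem a 0 hilen
      rw [hi2]; rw [hm] at hlt; omega
    · have : i = mid := by omega
      subst this; exact hlt
  | case3 lo hi h =>
    intro hlohi hhilen h1 h2
    have hlh : lo = hi := by omega
    subst hlh
    rw [pvBisect]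
    simp only [h, dite_false]
    -- a = take lo ++ drop lo; everything in take lo satisfies, nothing in drop lo does
    have hsplit := List.take_append_drop lo a
    have hcnt : a.countP (fun x => decide (x < y))
        = (a.take lo).countP (fun x => decide (x < y)) + (a.drop lo).countP (fun x => decide (x < y)) := by
      conv_lhs => rw [← hsplit]
      exact List.countP_append ..
    have htake : (a.take lo).countP (fun x => decide (x < y)) = (a.take lo).length := by
      apply List.countP_eq_length.mpr
      intro x hx
      rcases List.mem_iff_getElem.mp hx with ⟨i, hil, hxi⟩
      have hilo : i < lo := by
        have := hil; simp [List.length_take] at this; omega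
      have hia : i < a.length := by omega
      have : x = a[i] := by rw [← hxi]; exact List.getElem_take
      subst this
      have := h1 i hilo
      rw [List.getD_eq_getElem a 0 hia] at this
      simpa using this
    have hdrop : (a.drop lo).countP (fun x => decide (x < y)) = 0 := by
      apply List.countP_eq_zero.mpr
      intro x hx
      rcases List.mem_iff_getElem.mp hx with ⟨j, hjl, hxj⟩
      have hja : lo + j < a.length := by
        have := hjl; simp [List.length_drop] at this; omega
      have : x = a[lo + j] := by rw [← hxj]; exact List.getElem_drop
      subst this
      have := h2 (lo + j) (by omega) hja
      rw [List.getD_eq_getElem a 0 hja] at this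
      simpa using this
    rw [hcnt, htake, hdrop]
    simp [List.length_take]
    omega

-- per query y: A's inner counting loop equals B's binary search over the sorted counts
lemma pvQuery_eq (xs : List Int) (y : Int) :
    xs.foldl (fun cnt x => if x < y then cnt + 1 else cnt) (0 : Int)
      = ((pvBisect (PySem.List.sorted xs (fun x => x) false) y 0
            (PySem.List.sorted xs (fun x => x) false).length : Nat) : Int) := by
  set a := PySem.List.sorted xs (fun x => x) false with ha
  have hb : pvBisect a y 0 a.length = a.countP (fun x => decide (x < y)) := by
    apply pvBisect_eq_countP a y (PySem.List.sorted_pairwise xs (fun x => x))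
      0 a.length (Nat.zero_le _) (le_refl _)
    · intro i hi; omega
    · intro i hi hil; omega
  have hperm : a.Perm xs := PySem.List.sorted_perm xs (fun x => x) false
  rw [hb, hperm.countP_eq]
  rw [PySem.List.foldl_ite_add_one (fun x => x < y)]
  simp

-- ===== VERDICT (by name: the statement is the Claim_ definition above) =====
theorem compare_strings_mine_spec : Claim_equal_compare_strings_mine := by
  intro str1 str2 _ _
  unfold Spec_compare_strings_mine compare_strings_mine compare_strings_mine_alt
  simp only [List.map_map]
  apply List.map_congr_left
  intro s _
  simp only [Function.comp]
  exact pvQuery_eq (str1.map (fun s1 =>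
    match PySem.List.min? s1.toList (fun x => x) with
    | some c => (PySem.List.count s1.toList c : Int)
    | none => 0)) _
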